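-- pv_equiv track=rewrite | github.com/Aadithya-04/Leetcode-solutions | Strings/2264-Largest-3-Same-Digit-Number-in-String.py | largestGoodInteger
-- ===== SOURCE A (Python) =====
-- def largestGoodInteger(num: str) -> str:
--     max_good_integer = ""
--     for i in range(len(num) - 2):
--         substring = num[i:i+3]
--         if substring[0] == substring[1] == substring[2]:
--             if substring > max_good_integer:
--                 max_good_integer = substring  # Use max_good_integer to store the result
--     return max_good_integer
-- ===== SOURCE B (Python) =====
-- def largestGoodInteger(num: str) -> str:
--     for c in sorted(set(num), reverse=True):
--         if c * 3 in num:
--             return c * 3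
--     return ""
-- ===== Notes on version B (the rewrite author's own statement) =====
-- stated objective: faster
-- what changed: Instead of scanning every 3-char window in Python and tracking a running lexicographic max, B enumerates the distinct characters of num in descending order and returns the first triple c*3 that is a substring (the membership test runs in C), falling back to the empty string.
import Mathlib
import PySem

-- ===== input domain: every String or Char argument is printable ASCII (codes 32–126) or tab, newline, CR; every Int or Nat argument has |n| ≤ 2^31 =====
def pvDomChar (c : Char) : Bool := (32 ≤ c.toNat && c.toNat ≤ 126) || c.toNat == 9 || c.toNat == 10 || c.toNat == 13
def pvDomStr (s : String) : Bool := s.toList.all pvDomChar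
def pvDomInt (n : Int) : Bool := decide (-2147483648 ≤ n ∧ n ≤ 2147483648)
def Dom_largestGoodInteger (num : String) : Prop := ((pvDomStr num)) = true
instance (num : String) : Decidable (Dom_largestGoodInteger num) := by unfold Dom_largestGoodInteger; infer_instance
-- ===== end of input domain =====

-- ===== PORT A =====
-- B replaces A's sliding-window max with a descending scan over the distinct characters (idiomatic; same return value everywhere).
-- helper for A's loop body: 'if substring[0]==substring[1]==substring[2]: if substring > max_good_integer: ...'
def stepA (best sub : List Char) : List Char :=
  if PySem.List.pyGetD sub 0 ' ' = PySem.List.pyGetD sub 1 ' ' ∧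
     PySem.List.pyGetD sub 1 ' ' = PySem.List.pyGetD sub 2 ' ' then
    (if best < sub then sub else best)
  else best

def largestGoodInteger (num : String) : String :=
  let cs := num.toList
  String.ofList ((PySem.List.pyRange 0 (PySem.List.len cs - 2) 1).foldl
    (fun best i => stepA best (PySem.List.slice cs (some i) (some (i + 3)))) [])

-- ===== PORT B =====
-- 'for c in sorted(set(num), reverse=True): if c*3 in num: return c*3' / 'return ""'
def altFirst (chars : List Char) (s : List Char) : List Char :=
  match chars with
  | [] => []
  | c :: rest => if PySem.Chars.isIn [c, c, c] s then [c, c, c] else altFirst rest s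

def largestGoodInteger_alt (num : String) : String :=
  String.ofList (altFirst
    (PySem.List.sorted (PySem.Set.ofList num.toList) (fun c => c) true)
    num.toList)

-- ===== PRECONDITION & SPEC =====
def Spec_largestGoodInteger (num : String) (out : String) : Prop := out = largestGoodInteger_alt num
instance (num : String) (out : String) : Decidable (Spec_largestGoodInteger num out) := by unfold Spec_largestGoodInteger; infer_instance

-- ===== CLAIM (what is proved, stated in full; the proofs are below) =====
def Claim_equal_largestGoodInteger : Prop := ∀ (num : String), Dom_largestGoodInteger num → Spec_largestGoodInteger num (largestGoodInteger num)

-- ===== LEMMAS AND PROOFS =====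

-- the character at each window that is a triple, in window order
def triples : List Char → List Char
  | a :: b :: c :: r => (if a = b ∧ b = c then [a] else []) ++ triples (b :: c :: r)
  | _ => []

-- A's "max_good_integer" update, at the char level
def step3 (best : List Char) (c : Char) : List Char :=
  if best < [c, c, c] then [c, c, c] else best

theorem triple_lt_triple (a c : Char) : (([a,a,a] : List Char) < [c,c,c]) ↔ a < c := by
  simp [List.cons_lt_cons_iff]
  rintro rfl (h | ⟨-, h⟩) <;> exact h

theorem nil_lt_triple (c : Char) : (([] : List Char) < [c,c,c]) := by
  simp

theorem mem_triples {c : Char} : ∀ {cs : List Char}, c ∈ triples cs ↔ [c, c, c] <:+: cs := by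
  intro cs
  induction cs with
  | nil => exact ⟨fun h => absurd h (by simp [triples]), fun h => by have := h.length_le; simp at this⟩
  | cons a t ih =>
    match t, ih with
    | [], _ => exact ⟨fun h => absurd h (by simp [triples]), fun h => by have := h.length_le; simp at this⟩
    | [b], _ => exact ⟨fun h => absurd h (by simp [triples]), fun h => by have := h.length_le; simp at this⟩
    | b :: d :: r, ih =>
      constructor
      · intro h
        simp only [triples, List.mem_append] at h
        rcases h with h | h
        · split_ifs at h with hc
          · simp at h; subst h
            exact ⟨[], r, by simp [hc.1, hc.2]⟩
          · simp at h
        · exact (List.infix_cons_iff).mpr (Or.inr (ih.mp h))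
      · intro h
        rcases (List.infix_cons_iff).mp h with h | h
        · rcases h with ⟨s, hs⟩
          simp at hs
          obtain ⟨rfl, rfl, rfl, -⟩ := hs
          simp [triples]
        · simp only [triples, List.mem_append]
          exact Or.inr (ih.mpr h)

theorem fold3_rep (t : List Char) : ∀ a : Char,
    t.foldl step3 [a,a,a] = (letI m := t.foldl max a; [m,m,m]) := by
  induction t with
  | nil => intro a; simp
  | cons c t ih =>
    intro a
    simp only [List.foldl_cons, step3]
    rcases lt_trichotomy a c with h | h | h
    · rw [if_pos ((triple_lt_triple a c).mpr h), ih c, max_eq_right h.le]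
    · subst h; rw [if_neg (by rw [triple_lt_triple]; exact lt_irrefl a), ih a, max_self]
    · rw [if_neg (by rw [triple_lt_triple]; exact not_lt.mpr h.le), ih a, max_eq_left h.le]

-- the main bridge: A's char-level running max = B's first hit on a descending char list
theorem fold3_eq_altFirst : ∀ (S cs : List Char),
    S.Pairwise (fun x y => y ≤ x) →
    (∀ d, d ∈ triples cs → d ∈ S) →
    (triples cs).foldl step3 [] = altFirst S cs := by
  intro S
  induction S with
  | nil =>
    intro cs _ hsub
    have : triples cs = [] := by
      cases h : triples cs with
      | nil => rfl
      | cons x t => exact absurd (hsub x (by simp [h])) (by simp)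
    simp [this, altFirst]
  | cons c rest ih =>
    intro cs hpw hsub
    by_cases hin : PySem.Chars.isIn [c, c, c] cs = true
    · have hc : c ∈ triples cs := mem_triples.mpr ((PySem.Chars.isIn_iff_infix _ _).mp hin)
      simp only [altFirst, if_pos hin]
      obtain ⟨x, t, hxt⟩ : ∃ x t, triples cs = x :: t := by
        cases h : triples cs with
        | nil => rw [h] at hc; simp at hc
        | cons x t => exact ⟨x, t, rfl⟩
      rw [hxt]
      simp only [List.foldl_cons, step3, if_pos (nil_lt_triple x)]
      rw [fold3_rep]
      have hmax_mem : t.foldl max x = x ∨ t.foldl max x ∈ t := PySem.List.foldl_max_mem t x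
      have hm_mem : t.foldl max x ∈ triples cs := by
        rw [hxt]; rcases hmax_mem with h | h
        · simp [h]
        · simp [h]
      have hle : t.foldl max x ≤ c := by
        have hS := hsub _ hm_mem
        rcases List.mem_cons.mp hS with h | h
        · exact le_of_eq h
        · exact (List.pairwise_cons.mp hpw).1 _ h
      have hge : c ≤ t.foldl max x := by
        rw [hxt] at hc
        rcases List.mem_cons.mp hc with h | h
        · subst h; exact (PySem.List.le_foldl_max t c).1
        · exact (PySem.List.le_foldl_max t x).2 c h
      have : t.foldl max x = c := le_antisymm hle hge
      rw [this]
    · simp only [altFirst, if_neg hin]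
      refine ih cs (List.pairwise_cons.mp hpw).2 ?_
      intro d hd
      have hdc : d ≠ c := by
        rintro rfl
        exact hin ((PySem.Chars.isIn_iff_infix _ _).mpr (mem_triples.mp hd))
      rcases List.mem_cons.mp (hsub d hd) with h | h
      · exact absurd h hdc
      · exact h

-- A's foldl over windows = foldl of step3 over triples
theorem slice_shift (a : Char) (cs : List Char) (k : Nat) :
    PySem.List.slice (a :: cs) (some (1 + (k:Int))) (some (1 + (k:Int) + 3))
    = PySem.List.slice cs (some ((k:Int))) (some ((k:Int) + 3)) := by
  rw [show (1 + (k:Int)) = ((k+1 : Nat) : Int) by push_cast; ring]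
  rw [show (((k+1:Nat):Int) + 3) = ((k+4 : Nat) : Int) by push_cast; ring]
  rw [show ((k:Int) + 3) = ((k+3 : Nat) : Int) by push_cast; ring]
  rw [PySem.List.slice_natCast, PySem.List.slice_natCast]
  rw [List.drop_succ_cons]
  congr 1
  omega

theorem fold_shift (a : Char) (cs : List Char) (best : List Char) :
    (PySem.List.pyRange 1 (PySem.List.len (a :: cs) - 2) 1).foldl
      (fun b i => stepA b (PySem.List.slice (a :: cs) (some i) (some (i + 3)))) best
    = (PySem.List.pyRange 0 (PySem.List.len cs - 2) 1).foldl
      (fun b i => stepA b (PySem.List.slice cs (some i) (some (i + 3)))) best := by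
  rw [PySem.List.pyRange_one, PySem.List.pyRange_one]
  rw [show (PySem.List.len (a :: cs) - 2 - 1).toNat = (PySem.List.len cs - 2 - 0).toNat by
    simp [PySem.List.len_eq]; omega]
  rw [List.foldl_map, List.foldl_map]
  apply PySem.List.foldl_congr_mem
  intro b k _
  rw [zero_add, slice_shift]

theorem head_slice (a b d : Char) (r : List Char) :
    PySem.List.slice (a :: b :: d :: r) (some 0) (some 3) = [a, b, d] := by
  norm_num
  rw [show ((3:Int)) = ((3:Nat):Int) by norm_num, PySem.List.slice_to_natCast]
  simp [List.take]

theorem foldA_eq_fold3 : ∀ (cs : List Char) (best : List Char),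
    (PySem.List.pyRange 0 (PySem.List.len cs - 2) 1).foldl
      (fun b i => stepA b (PySem.List.slice cs (some i) (some (i + 3)))) best
    = (triples cs).foldl step3 best := by
  intro cs
  induction cs with
  | nil =>
    intro best
    rw [PySem.List.pyRange_one_eq_nil (by simp [PySem.List.len_eq])]
    simp [triples]
  | cons a t ih =>
    match t, ih with
    | [], _ =>
      intro best
      rw [PySem.List.pyRange_one_eq_nil (by
        simp only [PySem.List.len_eq, List.length_cons, List.length_nil]; omega)]
      simp [triples]
    | [b], _ =>
      intro best
      rw [PySem.List.pyRange_one_eq_nil (by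
        simp only [PySem.List.len_eq, List.length_cons, List.length_nil]; omega)]
      simp [triples]
    | b :: d :: r, ih =>
      intro best
      rw [PySem.List.pyRange_one_cons (by simp only [PySem.List.len_eq, List.length_cons]; omega)]
      rw [List.foldl_cons, show ((0:Int)+1) = 1 from by norm_num, show ((0:Int)+3) = 3 from by norm_num, fold_shift, ih, head_slice]
      simp only [triples, List.foldl_append]
      by_cases hc : a = b ∧ b = d
      · obtain ⟨rfl, rfl⟩ := hc
        rw [if_pos ⟨rfl, rfl⟩]
        simp [stepA, step3, PySem.List.pyGetD_ofNat']
      · rw [if_neg hc]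
        simp only [List.foldl_nil]
        congr 1
        simp [stepA, PySem.List.pyGetD_ofNat', hc]

theorem B_mem (num : String) (d : Char) :
    d ∈ PySem.List.sorted (PySem.Set.ofList num.toList) (fun c => c) true ↔ d ∈ num.toList := by
  rw [PySem.List.mem_sorted]
  exact PySem.Set.mem_ofList (y := d) (xs := num.toList)

-- ===== VERDICT (by name: the statement is the Claim_ definition above) =====
theorem largestGoodInteger_spec : Claim_equal_largestGoodInteger := by
  intro num _
  simp only [Spec_largestGoodInteger, largestGoodInteger, largestGoodInteger_alt]
  congr 1
  rw [foldA_eq_fold3]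
  apply fold3_eq_altFirst
  · exact PySem.List.sorted_pairwise_rev _ _
  · intro d hd
    rw [B_mem]
    exact (mem_triples.mp hd).mem (by simp)
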